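-- pv_equiv track=rewrite | github.com/keenon/AddBiomechanics | server/engine/src/helpers.py | get_consecutive_values
-- ===== SOURCE A (Python) =====
-- def get_consecutive_values(data):
--     from operator import itemgetter
--     from itertools import groupby
--     ranges = []
--     for key, group in groupby(enumerate(data), lambda x: x[0]-x[1]):
--         group = list(map(itemgetter(1), group))
--         ranges.append((group[0], group[-1]))
--
--     return ranges
-- ===== SOURCE B (Python) =====
-- def get_consecutive_values(data):
--     if not data:
--         return []
--     ranges = []
--     start = prev = data[0]
--     for v in data[1:]:
--         if v == prev + 1:
--             prev = v
--         else:
--             ranges.append((start, prev))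
--             start = prev = v
--     ranges.append((start, prev))
--     return ranges
-- ===== Notes on version B (the rewrite author's own statement) =====
-- stated objective: simpler
-- what changed: Replaces the groupby(enumerate(data), index-minus-value) grouping with a single explicit pass that tracks each run's start and previous value directly, avoiding enumerate tuples, groupby machinery and per-group list materialisation.
import Mathlib
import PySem

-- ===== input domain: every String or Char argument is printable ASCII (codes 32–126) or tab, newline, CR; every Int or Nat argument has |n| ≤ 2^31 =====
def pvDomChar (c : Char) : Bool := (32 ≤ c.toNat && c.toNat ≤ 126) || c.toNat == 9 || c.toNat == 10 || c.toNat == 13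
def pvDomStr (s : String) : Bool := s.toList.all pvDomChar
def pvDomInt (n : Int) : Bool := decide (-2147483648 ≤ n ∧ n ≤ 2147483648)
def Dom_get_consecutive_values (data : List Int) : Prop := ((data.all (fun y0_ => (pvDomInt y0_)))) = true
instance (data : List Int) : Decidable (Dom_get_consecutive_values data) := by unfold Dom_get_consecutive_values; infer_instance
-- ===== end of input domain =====

-- B replaces the groupby(enumerate(data), index-minus-value) grouping with one explicit
-- pass tracking the current run's start and previous value (objective: simpler).

-- ===== PORT A =====
-- itertools.groupby key: lambda x: x[0] - x[1]
def pvKey (x : Int × Int) : Int := x.1 - x.2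

-- left-to-right transliteration of the groupby iterator: current key k, current group
-- accumulated in reverse in cur
def pvGroupbyGo (k : Int) (cur : List (Int × Int)) : List (Int × Int) → List (Int × List (Int × Int))
  | [] => [(k, cur.reverse)]
  | x :: xs =>
      if pvKey x = k then pvGroupbyGo k (x :: cur) xs
      else (k, cur.reverse) :: pvGroupbyGo (pvKey x) [x] xs

def pvGroupby : List (Int × Int) → List (Int × List (Int × Int))
  | [] => []
  | x :: xs => pvGroupbyGo (pvKey x) [x] xs

-- for key, group in groupby(...): group = list(map(itemgetter(1), group)); ranges.append((group[0], group[-1]))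
def get_consecutive_values (data : List Int) : List (Int × Int) :=
  (pvGroupby (PySem.List.enumerate data)).map (fun kg =>
    let group := kg.2.map Prod.snd
    (group.head!, group.getLast!))

-- ===== PORT B =====
def pvRunsGo (start prev : Int) : List Int → List (Int × Int)
  | [] => [(start, prev)]
  | v :: rest =>
      if v = prev + 1 then pvRunsGo start v rest
      else (start, prev) :: pvRunsGo v v rest

def get_consecutive_values_alt : List Int → List (Int × Int)
  | [] => []
  | x :: rest => pvRunsGo x x rest

-- ===== PRECONDITION & SPEC =====
def Spec_get_consecutive_values (data : List Int) (out : List (Int × Int)) : Prop := out = get_consecutive_values_alt data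
instance (data : List Int) (out : List (Int × Int)) : Decidable (Spec_get_consecutive_values data out) := by unfold Spec_get_consecutive_values; infer_instance

-- ===== CLAIM (what is proved, stated in full; the proofs are below) =====
def Claim_equal_get_consecutive_values : Prop := ∀ (data : List Int), Dom_get_consecutive_values data → Spec_get_consecutive_values data (get_consecutive_values data)

-- ===== LEMMAS AND PROOFS =====

theorem pv_head!_of_head? {l : List Int} {a : Int} (h : l.head? = some a) : l.head! = a := by
  cases l with
  | nil => simp at h
  | cons x xs => simp_all [List.head!]

theorem pv_getLast!_of_getLast? {l : List Int} {a : Int} (h : l.getLast? = some a) : l.getLast! = a := by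
  cases l with
  | nil => simp at h
  | cons x xs =>
      rw [List.getLast?_eq_some_getLast (by simp)] at h
      simpa [List.getLast!] using h

theorem pv_getLast?_cons_of_ne_nil {α : Type} (b : α) (l : List α) (h : l ≠ []) :
    (b :: l).getLast? = l.getLast? := by
  cases hl : l.getLast? with
  | none => exact absurd (List.getLast?_eq_none_iff.mp hl) h
  | some c => simp [List.getLast?_cons, hl]

-- the emitted pair of a finished group: first value of the run, last value of the run
theorem pv_group_out (cur : List (Int × Int)) (i prev start : Int)
    (hh : cur.head? = some (i, prev))
    (hl : (cur.map Prod.snd).getLast? = some start) :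
    ((cur.reverse.map Prod.snd).head!, (cur.reverse.map Prod.snd).getLast!) = (start, prev) := by
  have hmap : cur.reverse.map Prod.snd = (cur.map Prod.snd).reverse := by
    simp [List.map_reverse]
  have hh' : (cur.map Prod.snd).head? = some prev := by
    cases cur with
    | nil => simp at hh
    | cons x xs => simp at hh ⊢; simp [hh]
  simp only [Prod.mk.injEq]
  exact ⟨pv_head!_of_head? (by rw [hmap, List.head?_reverse]; exact hl),
    pv_getLast!_of_getLast? (by rw [hmap, List.getLast?_reverse]; exact hh')⟩

-- loop invariant: the current group cur (accumulated in reverse) began the run at `start`,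
-- its most recent element is (i, prev), and the groupby state key is i - prev
theorem pv_main (vs : List Int) : ∀ (i prev start : Int) (cur : List (Int × Int)),
    cur.head? = some (i, prev) →
    (cur.map Prod.snd).getLast? = some start →
    (pvGroupbyGo (i - prev) cur (PySem.List.enumerate vs (i + 1))).map (fun kg =>
        let group := kg.2.map Prod.snd
        (group.head!, group.getLast!)) = pvRunsGo start prev vs := by
  induction vs with
  | nil =>
      intro i prev start cur hh hl
      rw [PySem.List.enumerate_nil]
      show [((cur.reverse.map Prod.snd).head!, (cur.reverse.map Prod.snd).getLast!)]
        = [(start, prev)]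
      rw [pv_group_out cur i prev start hh hl]
  | cons v rest ih =>
      intro i prev start cur hh hl
      rw [PySem.List.enumerate_cons, pvGroupbyGo]
      have hcur : cur ≠ [] := by cases cur <;> simp_all
      by_cases hv : v = prev + 1
      · have hk : pvKey (i + 1, v) = i - prev := by simp [pvKey]; omega
        rw [if_pos hk, show i - prev = (i + 1) - v by omega]
        rw [ih (i + 1) v start ((i + 1, v) :: cur) (by simp)
          (by rw [List.map_cons, pv_getLast?_cons_of_ne_nil _ _ (by simpa using hcur)]; exact hl)]
        simp [pvRunsGo, hv]
      · have hk : ¬ pvKey (i + 1, v) = i - prev := by simp [pvKey]; omega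
        rw [if_neg hk, List.map_cons]
        have h2 := ih (i + 1) v v [(i + 1, v)] (by simp) (by simp)
        rw [show pvKey (i + 1, v) = (i + 1) - v from rfl, h2]
        show (((cur.reverse.map Prod.snd).head!, (cur.reverse.map Prod.snd).getLast!))
            :: pvRunsGo v v rest = pvRunsGo start prev (v :: rest)
        rw [pv_group_out cur i prev start hh hl]
        simp [pvRunsGo, hv]

-- ===== VERDICT (by name: the statement is the Claim_ definition above) =====
theorem get_consecutive_values_spec : Claim_equal_get_consecutive_values := by
  intro data _
  show get_consecutive_values data = get_consecutive_values_alt data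
  cases data with
  | nil => simp [get_consecutive_values, get_consecutive_values_alt, PySem.List.enumerate_nil, pvGroupby]
  | cons x xs =>
      unfold get_consecutive_values get_consecutive_values_alt
      rw [show (PySem.List.enumerate (x :: xs)) = (0, x) :: PySem.List.enumerate xs 1 by
        simp [PySem.List.enumerate_cons]]
      show (pvGroupbyGo (pvKey (0, x)) [(0, x)] (PySem.List.enumerate xs (0 + 1))).map _ = _
      rw [show pvKey (0, x) = 0 - x by simp [pvKey]]
      exact pv_main xs 0 x x [(0, x)] (by simp) (by simp)
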